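-- pv_equiv track=rewrite | github.com/safakhan413/leetcode | stratascratch/int_from-s.py | integer_from_string
-- ===== SOURCE A (Python) =====
-- def integer_from_string(input_string):
--     # Define constants for the 32-bit integer range
--     INT_MIN = -2147483648
--     INT_MAX = 2147483647
--
--     # Edge case for empty input
--     if not input_string:
--         return 0
--
--     # Initialize variables
--     start = 0
--     sign = 1
--     result = 0
--
--     # Check for leading sign
--     if input_string[start] == '-':
--         sign = -1
--         start += 1
--     elif input_string[start] == '+':
--         start += 1
--
--     # Iterate over the string and build the number
--     for c in input_string[start:]:
--         if c.isdigit():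
--             digit = int(c)
--
--             # Check for overflow
--             if result > (INT_MAX - digit) // 10:
--                 return INT_MAX if sign == 1 else INT_MIN
--
--             result = result * 10 + digit
--         else:
--             break
--
--     return sign * result
-- ===== SOURCE B (Python) =====
-- def integer_from_string(input_string):
--     INT_MIN = -2147483648
--     INT_MAX = 2147483647
--     s = input_string or ''
--     sign = -1 if s[:1] == '-' else 1
--     body = s[1:] if s[:1] in ('-', '+') else s
--     # length of the leading digit run
--     i = 0
--     while i < len(body) and body[i].isdigit():
--         i += 1
--     digits = body[:i]
--     # positional-weight sum of the digit run, clamped once at the end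
--     magnitude = sum(int(d) * 10 ** k for k, d in enumerate(reversed(digits)))
--     return max(INT_MIN, min(INT_MAX, sign * magnitude))
-- ===== Notes on version B (the rewrite author's own statement) =====
-- stated objective: alternative
-- what changed: B extracts the sign and the leading digit run first, converts the run via a positional-weight sum, and clamps the full value once at the end, instead of A's digit-by-digit Horner accumulation with a per-step overflow test and early return.
import Mathlib
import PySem

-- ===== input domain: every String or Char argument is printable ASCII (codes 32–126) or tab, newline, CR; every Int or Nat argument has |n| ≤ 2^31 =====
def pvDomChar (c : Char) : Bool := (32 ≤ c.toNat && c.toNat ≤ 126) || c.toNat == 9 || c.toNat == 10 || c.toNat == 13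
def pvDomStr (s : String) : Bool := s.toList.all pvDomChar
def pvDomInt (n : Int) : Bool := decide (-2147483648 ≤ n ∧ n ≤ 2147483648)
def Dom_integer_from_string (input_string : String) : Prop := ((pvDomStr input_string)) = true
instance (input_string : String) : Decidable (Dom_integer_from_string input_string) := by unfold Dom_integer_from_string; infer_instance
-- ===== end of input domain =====

-- B replaces A's digit-by-digit Horner loop with per-step overflow test by extract-prefix,
-- positional-weight sum, and a single final clamp (alternative decomposition, similar cost).


-- ===== PORT A =====
-- int(c) for a character already guarded by c.isdigit() (exact on that guard)
def pvDigitVal (c : Char) : Int := (c.toNat : Int) - 48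

-- the 'for c in input_string[start:]' loop; 'break' and loop exit both fall through to 'return sign * result'
def pvLoopA (sign : Int) : List Char → Int → Int
  | [], r => sign * r
  | c :: cs, r =>
      if PySem.Chars.isdigit c then
        let d := pvDigitVal c
        if r > PySem.Int.floordiv (2147483647 - d) 10 then
          (if sign = 1 then 2147483647 else -2147483648)
        else pvLoopA sign cs (r * 10 + d)
      else sign * r

def integer_from_string (input_string : String) : Int :=
  let cs := input_string.toList
  if cs = [] then 0
  else if PySem.List.pyGet? cs 0 = some '-' then
    pvLoopA (-1) (PySem.List.slice cs (some 1) none) 0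
  else if PySem.List.pyGet? cs 0 = some '+' then
    pvLoopA 1 (PySem.List.slice cs (some 1) none) 0
  else
    pvLoopA 1 (PySem.List.slice cs (some 0) none) 0

-- ===== PORT B =====
-- the 'while i < len(body) and body[i].isdigit(): i += 1' index scan, as structural recursion on the list
def pvDigitRunLen : List Char → Nat
  | [] => 0
  | c :: cs => if PySem.Chars.isdigit c then pvDigitRunLen cs + 1 else 0

-- sum(int(d) * 10 ** k for k, d in enumerate(reversed(digits)))  (10 ** k with k ≥ 0, so Nat exponent is exact)
def pvMag (digits : List Char) : Int :=
  (PySem.List.enumerate digits.reverse 0).foldl (fun a p => a + pvDigitVal p.2 * 10 ^ p.1.toNat) 0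

def integer_from_string_alt (input_string : String) : Int :=
  let s := input_string.toList
  let sign : Int := if PySem.List.slice s none (some 1) = ['-'] then -1 else 1
  let body := if PySem.List.slice s none (some 1) = ['-'] ∨ PySem.List.slice s none (some 1) = ['+']
              then PySem.List.slice s (some 1) none else s
  let i := pvDigitRunLen body
  let digits := PySem.List.slice body none (some (i : Int))
  max (-2147483648) (min 2147483647 (sign * pvMag digits))

-- ===== PRECONDITION & SPEC =====
def Spec_integer_from_string (input_string : String) (out : Int) : Prop := out = integer_from_string_alt input_string
instance (input_string : String) (out : Int) : Decidable (Spec_integer_from_string input_string out) := by unfold Spec_integer_from_string; infer_instance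

-- ===== CLAIM (what is proved, stated in full; the proofs are below) =====
def Claim_equal_integer_from_string : Prop := ∀ (input_string : String), Dom_integer_from_string input_string → Spec_integer_from_string input_string (integer_from_string input_string)

-- ===== LEMMAS AND PROOFS =====
-- Horner value of a digit list with accumulator r (characterises A's loop result)
def pvHorner : List Char → Int → Int
  | [], r => r
  | c :: cs, r => pvHorner cs (r * 10 + pvDigitVal c)

theorem pvDigitVal_bounds (c : Char) (h : PySem.Chars.isdigit c = true) :
    0 ≤ pvDigitVal c ∧ pvDigitVal c ≤ 9 := by
  have hb : 48 ≤ c.toNat ∧ c.toNat ≤ 57 := by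
    simp [PySem.Chars.isdigit, Char.le_def] at h
    exact ⟨h.1, h.2⟩
  unfold pvDigitVal
  omega

theorem pvHorner_ge (ds : List Char) (r : Int)
    (hd : ∀ c ∈ ds, PySem.Chars.isdigit c = true) (hr : 0 ≤ r) :
    r ≤ pvHorner ds r := by
  induction ds generalizing r with
  | nil => simp [pvHorner]
  | cons c cs ih =>
      have hc := pvDigitVal_bounds c (hd c (by simp))
      have h1 : r ≤ r * 10 + pvDigitVal c := by nlinarith
      have h2 := ih (r * 10 + pvDigitVal c) (fun x hx => hd x (by simp [hx])) (by omega)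
      simp only [pvHorner]
      omega

theorem pvLoopA_eq (sign : Int) (cs : List Char) (r : Int)
    (h0 : 0 ≤ r) (h1 : r ≤ 2147483647) :
    pvLoopA sign cs r =
      (if 2147483647 < pvHorner (cs.takeWhile (fun c => PySem.Chars.isdigit c)) r
       then (if sign = 1 then 2147483647 else -2147483648)
       else sign * pvHorner (cs.takeWhile (fun c => PySem.Chars.isdigit c)) r) := by
  induction cs generalizing r with
  | nil => simp [pvLoopA, pvHorner]; omega
  | cons c cs ih =>
      by_cases hc : PySem.Chars.isdigit c = true
      · have hd := pvDigitVal_bounds c hc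
        obtain ⟨hq1, hq2⟩ := (PySem.Int.floordiv_eq_iff_of_pos
          (a := 2147483647 - pvDigitVal c) (b := 10)
          (q := PySem.Int.floordiv (2147483647 - pvDigitVal c) 10) (by omega)).mp rfl
        rw [List.takeWhile_cons_of_pos hc]
        simp only [pvLoopA, hc, if_true, pvHorner]
        by_cases hov : r > PySem.Int.floordiv (2147483647 - pvDigitVal c) 10
        · -- A clamps here; the full value also exceeds INT_MAX, so B's final clamp agrees
          have hbig : 2147483647 < r * 10 + pvDigitVal c := by nlinarith
          have hmono := pvHorner_ge (cs.takeWhile (fun c => PySem.Chars.isdigit c))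
            (r * 10 + pvDigitVal c)
            (fun x hx => List.mem_takeWhile_imp hx) (by omega)
          rw [if_pos hov, if_pos (show 2147483647 <
            pvHorner (cs.takeWhile (fun c => PySem.Chars.isdigit c))
              (r * 10 + pvDigitVal c) by omega)]
        · have hle : r * 10 + pvDigitVal c ≤ 2147483647 := by nlinarith
          rw [if_neg hov]
          exact ih (r * 10 + pvDigitVal c) (by omega) hle
      · rw [List.takeWhile_cons_of_neg (by simp [hc])]
        simp only [pvLoopA, pvHorner]
        rw [if_neg hc]
        have hnlt : ¬ (2147483647 < r) := by omega
        rw [if_neg hnlt]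

theorem pvTake_runLen (cs : List Char) :
    cs.take (pvDigitRunLen cs) = cs.takeWhile (fun c => PySem.Chars.isdigit c) := by
  induction cs with
  | nil => simp
  | cons c cs ih =>
      by_cases hc : PySem.Chars.isdigit c = true
      · simp [pvDigitRunLen, hc, List.takeWhile_cons_of_pos, ih]
      · simp [pvDigitRunLen, hc, List.takeWhile_cons_of_neg]

theorem pvMag_cons (c : Char) (cs : List Char) :
    pvMag (c :: cs) = pvMag cs + pvDigitVal c * 10 ^ cs.length := by
  unfold pvMag
  rw [show (c :: cs).reverse = cs.reverse ++ [c] by simp,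
      PySem.List.enumerate_append, List.foldl_append]
  simp [PySem.List.enumerate_cons]

theorem pvHorner_shift (ds : List Char) (r : Int) :
    pvHorner ds r = r * 10 ^ ds.length + pvHorner ds 0 := by
  induction ds generalizing r with
  | nil => simp [pvHorner]
  | cons c cs ih =>
      simp only [pvHorner, List.length_cons]
      rw [ih (r * 10 + pvDigitVal c), ih (0 * 10 + pvDigitVal c)]
      ring

theorem pvMag_eq_pvHorner (ds : List Char) : pvMag ds = pvHorner ds 0 := by
  induction ds with
  | nil => simp [pvMag, pvHorner]
  | cons c cs ih =>
      rw [pvMag_cons, ih, show pvHorner (c :: cs) 0 = pvHorner cs (0 * 10 + pvDigitVal c) from rfl,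
          pvHorner_shift cs (0 * 10 + pvDigitVal c)]
      ring

theorem pvHorner_tw_nonneg (cs : List Char) :
    0 ≤ pvHorner (cs.takeWhile (fun c => PySem.Chars.isdigit c)) 0 :=
  pvHorner_ge _ 0 (fun _ hx => List.mem_takeWhile_imp hx) le_rfl

theorem pvSlice_digits (b : List Char) :
    PySem.List.slice b none (some ((pvDigitRunLen b : Nat) : Int)) =
      b.takeWhile (fun c => PySem.Chars.isdigit c) := by
  rw [PySem.List.slice_to b (by omega)]
  simp [pvTake_runLen]

-- ===== VERDICT (by name: the statement is the Claim_ definition above) =====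
theorem integer_from_string_spec : Claim_equal_integer_from_string := by
  intro s _
  unfold Spec_integer_from_string integer_from_string integer_from_string_alt
  simp only [PySem.List.slice_from_one, PySem.List.slice_zero_start, PySem.List.slice_none_none,
    pvSlice_digits]
  cases hcs : s.toList with
  | nil =>
      rw [PySem.List.slice_to ([] : List Char) (b := 1) (by omega)]
      simp [pvMag]
  | cons c t =>
      have hget : PySem.List.pyGet? (c :: t) (0 : Int) = some c := by
        simp
      have htake1 : PySem.List.slice (c :: t) none (some 1) = [c] := by
        rw [PySem.List.slice_to (c :: t) (b := 1) (by omega)]; simp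
      simp only [hget, htake1, List.cons_ne_nil, if_false, List.tail_cons,
        Option.some.injEq, List.cons.injEq, and_true]
      by_cases hminus : c = '-'
      · simp only [hminus, if_true, true_or]
        rw [pvLoopA_eq (-1) t 0 (le_refl 0) (by decide), pvMag_eq_pvHorner]
        have hv := pvHorner_tw_nonneg t
        split_ifs <;> first | exact (False.elim ‹False›) | omega
      · by_cases hplus : c = '+'
        · simp only [hplus, show (('+' : Char) = '-') = False by simp, if_true, if_false, or_true]
          rw [pvLoopA_eq 1 t 0 (le_refl 0) (by decide), pvMag_eq_pvHorner]
          have hv := pvHorner_tw_nonneg t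
          split_ifs <;> first | exact (False.elim ‹False›) | omega
        · simp only [if_neg hminus, if_neg hplus,
            if_neg (show ¬ (c = '-' ∨ c = '+') by tauto)]
          rw [pvLoopA_eq 1 (c :: t) 0 (le_refl 0) (by decide), pvMag_eq_pvHorner]
          have hv := pvHorner_tw_nonneg (c :: t)
          split_ifs <;> first | exact (False.elim ‹False›) | omega
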